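-- pv_equiv track=rewrite | github.com/TD717/Linux-Advisory-Tool | src/linux_hardening_advisor/runtime/host_snapshot.py | _has_pwquality_params
-- ===== SOURCE A (Python) =====
-- _PWQUALITY_PARAM_KEYS = ("minlen", "minclass", "dcredit", "ucredit", "lcredit", "ocredit")
--
-- def _has_pwquality_params(text_lower: str) -> bool:
--     """Return True when any known pwquality parameter key is explicitly set."""
--     for raw in text_lower.splitlines():
--         line = raw.strip()
--         if not line or line.startswith("#"):
--             continue
--         for key in _PWQUALITY_PARAM_KEYS:
--             if line.startswith(f"{key}=") or line.startswith(f"{key} "):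
--                 return True
--     return False
-- ===== SOURCE B (Python) =====
-- _PWQUALITY_PARAM_KEYS = ("minlen", "minclass", "dcredit", "ucredit", "lcredit", "ocredit")
--
-- _PWQUALITY_KEY_SET = frozenset(_PWQUALITY_PARAM_KEYS)
--
-- def _has_pwquality_params(text_lower: str) -> bool:
--     """Return True when any known pwquality parameter key is explicitly set."""
--     for raw in text_lower.splitlines():
--         line = raw.strip()
--         if not line or line.startswith("#"):
--             continue
--         # scan for the earliest delimiter ('=' or space); the prefix before it is the key token
--         for i, ch in enumerate(line):
--             if ch == "=" or ch == " ":
--                 if line[:i] in _PWQUALITY_KEY_SET: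
--                     return True
--                 break
--     return False
-- ===== Notes on version B (the rewrite author's own statement) =====
-- stated objective: alternative
-- what changed: A tests each stripped line against 12 precomputed key prefixes (6 keys x 2 delimiters); B instead scans the line once for the earliest delimiter (equals sign or blank) and does a single set-membership lookup of the extracted key token.
import Mathlib
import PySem

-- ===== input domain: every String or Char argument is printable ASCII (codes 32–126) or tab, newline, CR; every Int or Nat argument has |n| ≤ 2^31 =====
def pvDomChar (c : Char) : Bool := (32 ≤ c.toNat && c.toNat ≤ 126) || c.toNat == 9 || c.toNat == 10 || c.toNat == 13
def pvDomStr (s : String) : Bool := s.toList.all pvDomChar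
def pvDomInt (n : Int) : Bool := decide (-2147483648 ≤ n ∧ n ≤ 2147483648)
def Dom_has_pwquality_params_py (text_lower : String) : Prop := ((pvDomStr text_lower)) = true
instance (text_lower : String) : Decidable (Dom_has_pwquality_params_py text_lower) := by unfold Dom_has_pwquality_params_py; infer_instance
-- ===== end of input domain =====

-- B replaces A's per-line scan over 12 key prefixes by one scan for the earliest delimiter
-- ('=' or space) followed by a single set-membership lookup of the extracted key token (simpler).

-- ===== PORT A =====
def pyKeys : List String := ["minlen", "minclass", "dcredit", "ucredit", "lcredit", "ocredit"]

def has_pwquality_params_py (text_lower : String) : Bool :=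
  (PySem.Str.splitlines text_lower).any fun raw =>
    let line := PySem.Str.strip raw
    if line == "" || PySem.Str.startswith line "#" then false
    else pyKeys.any fun key =>
      PySem.Str.startswith line (key ++ "=") || PySem.Str.startswith line (key ++ " ")

-- ===== PORT B =====
def pvKeySet : List (List Char) := pyKeys.map String.toList

-- the inner 'for i, ch in enumerate(line): …' loop of Source B: pre is line[:i]
def pvScanKey (pre : List Char) : List Char → Bool
  | [] => false
  | c :: rest =>
    if c = '=' ∨ c = ' ' then pvKeySet.contains pre
    else pvScanKey (pre ++ [c]) rest

def has_pwquality_params_py_alt (text_lower : String) : Bool :=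
  (PySem.Str.splitlines text_lower).any fun raw =>
    let line := PySem.Str.strip raw
    if line == "" || PySem.Str.startswith line "#" then false
    else pvScanKey [] line.toList

-- ===== PRECONDITION & SPEC =====
def Spec_has_pwquality_params_py (text_lower : String) (out : Bool) : Prop := out = has_pwquality_params_py_alt text_lower
instance (text_lower : String) (out : Bool) : Decidable (Spec_has_pwquality_params_py text_lower out) := by unfold Spec_has_pwquality_params_py; infer_instance

-- ===== CLAIM (what is proved, stated in full; the proofs are below) =====
def Claim_equal_has_pwquality_params_py : Prop := ∀ (text_lower : String), Dom_has_pwquality_params_py text_lower → Spec_has_pwquality_params_py text_lower (has_pwquality_params_py text_lower)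

-- ===== LEMMAS AND PROOFS =====

lemma pv_prefix_snoc_iff (p : List Char) (d : Char) (cs : List Char) :
    (p ++ [d]) <+: cs ↔ ∃ rest, cs = p ++ d :: rest := by
  constructor
  · rintro ⟨t, ht⟩; exact ⟨t, by simpa [List.append_assoc] using ht.symm⟩
  · rintro ⟨rest, rfl⟩; exact ⟨rest, by simp⟩

lemma pv_keys_nondelim : ∀ k ∈ pyKeys, ∀ c ∈ k.toList, ¬(c = '=' ∨ c = ' ') := by
  simp [pyKeys]

lemma pv_anyA_iff (cs : List Char) :
    (pyKeys.any fun key =>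
      PySem.Chars.startswith cs (key.toList ++ ['=']) || PySem.Chars.startswith cs (key.toList ++ [' '])) = true ↔
    ∃ k ∈ pyKeys, ∃ d rest, (d = '=' ∨ d = ' ') ∧ cs = k.toList ++ d :: rest := by
  rw [List.any_eq_true]
  constructor
  · rintro ⟨k, hk, h⟩
    rcases Bool.or_eq_true_iff.mp h with h' | h'
    · obtain ⟨r, hr⟩ := (pv_prefix_snoc_iff _ _ _).mp ((PySem.Chars.startswith_iff _ _).mp h')
      exact ⟨k, hk, '=', r, Or.inl rfl, hr⟩
    · obtain ⟨r, hr⟩ := (pv_prefix_snoc_iff _ _ _).mp ((PySem.Chars.startswith_iff _ _).mp h')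
      exact ⟨k, hk, ' ', r, Or.inr rfl, hr⟩
  · rintro ⟨k, hk, d, r, hd, hcs⟩
    refine ⟨k, hk, ?_⟩
    rcases hd with rfl | rfl
    · exact Bool.or_eq_true_iff.mpr (Or.inl ((PySem.Chars.startswith_iff _ _).mpr ((pv_prefix_snoc_iff _ _ _).mpr ⟨r, hcs⟩)))
    · exact Bool.or_eq_true_iff.mpr (Or.inr ((PySem.Chars.startswith_iff _ _).mpr ((pv_prefix_snoc_iff _ _ _).mpr ⟨r, hcs⟩)))

lemma pv_scan_iff (cs : List Char) : ∀ pre,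
    pvScanKey pre cs = true ↔
    ∃ t d rest, (∀ c ∈ t, ¬(c = '=' ∨ c = ' ')) ∧ (d = '=' ∨ d = ' ') ∧
      cs = t ++ d :: rest ∧ pvKeySet.contains (pre ++ t) = true := by
  induction cs with
  | nil =>
    intro pre
    simp only [pvScanKey]
    constructor
    · intro h; cases h
    · rintro ⟨t, d, rest, -, -, h, -⟩; exact absurd h (by simp)
  | cons c rest ih =>
    intro pre
    by_cases hc : c = '=' ∨ c = ' '
    · simp only [pvScanKey, if_pos hc]
      constructor
      · intro h; exact ⟨[], c, rest, by simp, hc, rfl, by simpa using h⟩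
      · rintro ⟨t, d, r, ht, hd, heq, hcont⟩
        cases t with
        | nil => simpa using hcont
        | cons c' t' =>
          have : c' = c := by simpa using congrArg (·.head?) heq.symm
          exact absurd hc (this ▸ ht c' (by simp))
    · simp only [pvScanKey, if_neg hc]
      rw [ih (pre ++ [c])]
      constructor
      · rintro ⟨t, d, r, ht, hd, heq, hcont⟩
        refine ⟨c :: t, d, r, ?_, hd, by simp [heq], by simpa [List.append_assoc] using hcont⟩
        intro x hx
        rcases List.mem_cons.mp hx with rfl | hx
        · exact hc
        · exact ht x hx
      · rintro ⟨t, d, r, ht, hd, heq, hcont⟩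
        cases t with
        | nil =>
          have : d = c := by simpa using congrArg (·.head?) heq.symm
          exact absurd (this ▸ hd) hc
        | cons c' t' =>
          have hc' : c' = c := by simpa using congrArg (·.head?) heq.symm
          subst hc'
          have htail : rest = t' ++ d :: r := by simpa using congrArg (·.tail) heq
          exact ⟨t', d, r, fun x hx => ht x (List.mem_cons_of_mem _ hx), hd, htail,
            by simpa [List.append_assoc] using hcont⟩

lemma pv_core (line : String) :
    (pyKeys.any fun key =>
      PySem.Str.startswith line (key ++ "=") || PySem.Str.startswith line (key ++ " ")) =
    pvScanKey [] line.toList := by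
  rw [Bool.eq_iff_iff]
  have hA : ∀ (k : String),
      (PySem.Str.startswith line (k ++ "=") || PySem.Str.startswith line (k ++ " ")) =
      (PySem.Chars.startswith line.toList (k.toList ++ ['=']) ||
       PySem.Chars.startswith line.toList (k.toList ++ [' '])) := fun k => by
    simp [PySem.Str.startswith]
  simp only [hA]
  rw [pv_anyA_iff, pv_scan_iff]
  constructor
  · rintro ⟨k, hk, d, r, hd, hcs⟩
    refine ⟨k.toList, d, r, pv_keys_nondelim k hk, hd, hcs, ?_⟩
    simp only [List.nil_append, List.contains_iff_mem, pvKeySet, List.mem_map]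
    exact ⟨k, hk, rfl⟩
  · rintro ⟨t, d, r, -, hd, hcs, hcont⟩
    obtain ⟨k, hk, hkt⟩ : ∃ k ∈ pyKeys, k.toList = t := by
      simpa [pvKeySet, List.contains_iff_mem] using hcont
    exact ⟨k, hk, d, r, hd, hkt ▸ hcs⟩

lemma pv_perLine (raw : String) :
    (let line := PySem.Str.strip raw
     if line == "" || PySem.Str.startswith line "#" then false
     else pyKeys.any fun key =>
       PySem.Str.startswith line (key ++ "=") || PySem.Str.startswith line (key ++ " ")) =
    (let line := PySem.Str.strip raw
     if line == "" || PySem.Str.startswith line "#" then false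
     else pvScanKey [] line.toList) := by
  simp only []
  split_ifs with h
  · rfl
  · exact pv_core _

-- ===== VERDICT (by name: the statement is the Claim_ definition above) =====
theorem has_pwquality_params_py_spec : Claim_equal_has_pwquality_params_py := by
  intro text _
  unfold Spec_has_pwquality_params_py has_pwquality_params_py has_pwquality_params_py_alt
  exact congrArg _ (funext pv_perLine)
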